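-- pv_equiv track=rewrite | github.com/thinkSharp/interviewsBit | encrypted_words.py | encrypt_word
-- ===== SOURCE A (Python) =====
-- def encrypt_word(s):
--     n = len(s)
--     if n <= 2:
--         return s
--     mid = n // 2
--     is_odd = mid % 2
--
--     if not is_odd:
--         mid = mid - 1
--
--     middle_char = s[mid]
--     left_s = encrypt_word(s[:mid])
--     right_s = encrypt_word(s[mid+1:])
--
--     return middle_char + left_s + right_s
-- ===== SOURCE B (Python) =====
-- def encrypt_word(s):
--     # Iterative version: explicit stack of (lo, hi) index ranges, preorder emission.
--     out = []
--     stack = [(0, len(s))]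
--     while stack:
--         lo, hi = stack.pop()
--         n = hi - lo
--         if n <= 2:
--             out.append(s[lo:hi])
--             continue
--         mid = n // 2
--         if mid % 2 == 0:
--             mid -= 1
--         m = lo + mid
--         out.append(s[m])
--         stack.append((m + 1, hi))
--         stack.append((lo, m))
--     return ''.join(out)
-- ===== Notes on version B (the rewrite author's own statement) =====
-- stated objective: alternative
-- what changed: Replaced the naive recursion with slice copies by an iterative explicit stack of (lo,hi) index ranges into the original string, emitting the preorder into a result list joined once at the end.
import Mathlib
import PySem

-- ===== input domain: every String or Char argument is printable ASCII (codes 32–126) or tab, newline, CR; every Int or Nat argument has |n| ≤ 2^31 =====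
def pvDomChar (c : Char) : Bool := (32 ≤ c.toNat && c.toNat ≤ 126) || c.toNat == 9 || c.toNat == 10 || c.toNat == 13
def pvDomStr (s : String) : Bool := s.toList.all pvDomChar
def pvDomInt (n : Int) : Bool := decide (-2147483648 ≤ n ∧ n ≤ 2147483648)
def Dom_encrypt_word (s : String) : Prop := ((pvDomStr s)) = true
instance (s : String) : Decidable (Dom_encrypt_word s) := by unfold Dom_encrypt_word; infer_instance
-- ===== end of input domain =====

-- B replaces A's recursion-with-slices by an explicit stack of (lo,hi) index ranges (alternative decomposition).

-- ===== PORT A =====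
-- Recursion on the character list; slices s[:mid] / s[mid+1:] with nonnegative in-range
-- bounds are exactly take/drop (PySem.List.slice_to_natCast / slice_from_natCast), and
-- s[mid] with mid provably in range is getD.  The fuel argument is only a structural
-- totality guard (never exhausted when fuel ≥ cs.length: each recursive call strictly
-- shrinks the list).
def encAList : Nat → List Char → List Char
  | 0, cs => cs
  | fuel + 1, cs =>
    if cs.length ≤ 2 then cs
    else
      let mid0 := cs.length / 2
      let mid := if mid0 % 2 = 0 then mid0 - 1 else mid0
      cs.getD mid default :: (encAList fuel (cs.take mid) ++ encAList fuel (cs.drop (mid + 1)))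

def encrypt_word (s : String) : String := String.ofList (encAList s.toList.length s.toList)

-- ===== PORT B =====
-- Explicit LIFO stack of (lo, hi) ranges into the fixed list cs; out accumulates the
-- answer.  The fuel argument is only a totality guard for the while loop (never
-- exhausted when fuel ≥ 2*n+1: the loop runs at most that many iterations).
def encBLoop (cs : List Char) : Nat → List (Nat × Nat) → List Char → List Char
  | _, [], out => out
  | 0, _, out => out
  | fuel + 1, (lo, hi) :: rest, out =>
    if hi - lo ≤ 2 then
      encBLoop cs fuel rest (out ++ (cs.drop lo).take (hi - lo))
    else
      let mid0 := (hi - lo) / 2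
      let mid := if mid0 % 2 = 0 then mid0 - 1 else mid0
      let m := lo + mid
      encBLoop cs fuel ((lo, m) :: (m + 1, hi) :: rest) (out ++ [cs.getD m default])

def encrypt_word_alt (s : String) : String :=
  String.ofList (encBLoop s.toList (2 * s.toList.length + 1) [(0, s.toList.length)] [])

-- ===== PRECONDITION & SPEC =====
def Spec_encrypt_word (s : String) (out : String) : Prop := out = encrypt_word_alt s
instance (s : String) (out : String) : Decidable (Spec_encrypt_word s out) := by unfold Spec_encrypt_word; infer_instance

-- ===== CLAIM (what is proved, stated in full; the proofs are below) =====
def Claim_equal_encrypt_word : Prop := ∀ (s : String), Dom_encrypt_word s → Spec_encrypt_word s (encrypt_word s)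

-- ===== LEMMAS AND PROOFS =====

-- The mathematical recursion both ports compute (proof-side middleman).
def encE (cs : List Char) : List Char :=
  if cs.length ≤ 2 then cs
  else
    let mid0 := cs.length / 2
    let mid := if mid0 % 2 = 0 then mid0 - 1 else mid0
    cs.getD mid default :: (encE (cs.take mid) ++ encE (cs.drop (mid + 1)))
termination_by cs.length
decreasing_by
  · simp only [List.length_take]; split <;> omega
  · simp only [List.length_drop]; split <;> omega

-- With enough fuel, port A computes encE.
lemma encAList_eq_encE : ∀ fuel cs, cs.length ≤ fuel → encAList fuel cs = encE cs := by
  intro fuel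
  induction fuel with
  | zero =>
    intro cs h
    have : cs = [] := List.length_eq_zero_iff.mp (Nat.le_zero.mp h)
    subst this
    simp [encAList, encE]
  | succ fuel ih =>
    intro cs h
    rw [encAList, encE]
    by_cases hb : cs.length ≤ 2
    · simp [hb]
    · simp only [if_neg hb]
      rw [ih _ (by simp only [List.length_take]; split <;> omega),
          ih _ (by simp only [List.length_drop]; split <;> omega)]

-- With enough fuel, B's stack loop appends encE of every pending segment, in order.
lemma encBLoop_eq (cs : List Char) :
    ∀ fuel stack out,
    (stack.map (fun p => 2 * (p.2 - p.1) + 1)).sum ≤ fuel →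
    (∀ p ∈ stack, p.1 ≤ p.2 ∧ p.2 ≤ cs.length) →
    encBLoop cs fuel stack out
      = out ++ (stack.map (fun p => encE ((cs.drop p.1).take (p.2 - p.1)))).flatten := by
  intro fuel
  induction fuel with
  | zero =>
    intro stack out hfuel _
    match stack with
    | [] => simp [encBLoop]
    | (lo, hi) :: rest => simp only [List.map_cons, List.sum_cons] at hfuel; omega
  | succ fuel ih =>
    intro stack out hfuel hwf
    match stack with
    | [] => simp [encBLoop]
    | (lo, hi) :: rest =>
      have hfr := hwf (lo, hi) (by simp)
      have hseglen : ((cs.drop lo).take (hi - lo)).length = hi - lo := by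
        simp [List.length_take, List.length_drop]; omega
      simp only [List.map_cons, List.sum_cons] at hfuel
      by_cases hbase : hi - lo ≤ 2
      · rw [encBLoop]
        simp only [if_pos hbase]
        rw [ih rest _ (by omega) (fun p hp => hwf p (by simp [hp]))]
        simp only [List.map_cons, List.flatten_cons]
        rw [encE, if_pos (by rw [hseglen]; exact hbase)]
        simp [List.append_assoc]
      · rw [encBLoop]
        simp only [if_neg hbase]
        set mid := if (hi - lo) / 2 % 2 = 0 then (hi - lo) / 2 - 1 else (hi - lo) / 2 with hm
        have hmid : 1 ≤ mid ∧ mid < hi - lo := by rw [hm]; split <;> omega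
        rw [ih ((lo, lo + mid) :: (lo + mid + 1, hi) :: rest) _
            (by simp only [List.map_cons, List.sum_cons]; omega)
            (by
              intro p hp
              simp only [List.mem_cons] at hp
              rcases hp with h | h | h
              · subst h; constructor <;> omega
              · subst h; constructor <;> omega
              · exact hwf p (by simp [h]))]
        simp only [List.map_cons, List.flatten_cons]
        conv_rhs => rw [encE]
        rw [hseglen, if_neg hbase]
        simp only []
        rw [← hm]
        have hml : lo + mid - lo = mid := by omega
        rw [hml]
        have e1 : (List.take (hi - lo) (List.drop lo cs)).getD mid default
            = cs.getD (lo + mid) default := by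
          rw [List.getD_eq_getElem _ _ (by rw [hseglen]; omega),
              List.getD_eq_getElem _ _ (by omega)]
          simp only [List.getElem_take, List.getElem_drop]
        have e2 : List.take mid (List.take (hi - lo) (List.drop lo cs))
            = List.take mid (List.drop lo cs) := by
          rw [List.take_take, Nat.min_eq_left (le_of_lt hmid.2)]
        have e3 : List.drop (mid + 1) (List.take (hi - lo) (List.drop lo cs))
            = List.take (hi - (lo + mid + 1)) (List.drop (lo + mid + 1) cs) := by
          rw [List.drop_take, List.drop_drop]
          congr 1
          omega
        rw [e1, e2, e3]
        simp [List.append_assoc]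

-- ===== VERDICT (by name: the statement is the Claim_ definition above) =====
theorem encrypt_word_spec : Claim_equal_encrypt_word := by
  intro s _
  unfold Spec_encrypt_word encrypt_word encrypt_word_alt
  rw [encAList_eq_encE _ _ le_rfl]
  rw [encBLoop_eq s.toList (2 * s.toList.length + 1) [(0, s.toList.length)] []
      (by simp) (by intro p hp; simp at hp; subst hp; simp)]
  simp only [List.map_cons, List.map_nil, List.flatten_cons, List.flatten_nil,
    List.nil_append, List.append_nil, List.drop_zero, Nat.sub_zero, List.take_length]
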